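-- pv_equiv track=rewrite | github.com/levychan076-ai/alumni-system | app.py | normalize_column_name
-- ===== SOURCE A (Python) =====
-- def normalize_column_name(col_name):
--     """Normalize column names to match database fields"""
--     col_name = str(col_name).strip().lower()
--
--     # Personal Info mappings - more specific matching
--     if any(keyword in col_name for keyword in ['student number', 'stud_num', 'student no']):
--         return 'stud_num'
--     elif any(keyword in col_name for keyword in ['last name', 'surname', 'family', 'last']):
--         return 'last_name'
--     elif any(keyword in col_name for keyword in ['first name', 'given', 'first']):
--         return 'first_name'
--     elif any(keyword in col_name for keyword in ['middle name', 'middle']):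
--         return 'middle_name'
--     elif any(keyword in col_name for keyword in ['email address', 'email']):
--         return 'email'
--     elif any(keyword in col_name for keyword in ['address']):
--         return 'address'
--     elif any(keyword in col_name for keyword in ['contact number', 'phone', 'mobile', 'contact']):
--         return 'contact_num'
--     elif any(keyword in col_name for keyword in ['photo']):
--         return 'photo'
--
--     # Educational Info mappings
--     elif any(keyword in col_name for keyword in ['program', 'course', 'degree']):
--         return 'program'
--     elif any(keyword in col_name for keyword in ['major', 'specialization']):
--         return 'major'
--     elif any(keyword in col_name for keyword in ['graduation', 'grad']):
--         return 'graduation_date'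
--
--     # Employment Info mappings
--     elif any(keyword in col_name for keyword in ['employment', 'status']):
--         return 'employment_status'
--     elif any(keyword in col_name for keyword in ['sector']):
--         return 'employment_sector'
--     elif any(keyword in col_name for keyword in ['job', 'position', 'title']):
--         return 'job_title'
--     elif any(keyword in col_name for keyword in ['relevance', 'relevant']):
--         return 'degree_relevance_to_work'
--
--     return col_name
-- ===== SOURCE B (Python) =====
-- # Single position-driven scan: walk the normalized string once per start index,
-- # testing which keywords begin at that position, and keep the mapping of the
-- # highest-priority (earliest) keyword group seen anywhere in the string.
-- GROUPS = [
--     (['student number', 'stud_num', 'student no'], 'stud_num'),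
--     (['last name', 'surname', 'family', 'last'], 'last_name'),
--     (['first name', 'given', 'first'], 'first_name'),
--     (['middle name', 'middle'], 'middle_name'),
--     (['email address', 'email'], 'email'),
--     (['address'], 'address'),
--     (['contact number', 'phone', 'mobile', 'contact'], 'contact_num'),
--     (['photo'], 'photo'),
--     (['program', 'course', 'degree'], 'program'),
--     (['major', 'specialization'], 'major'),
--     (['graduation', 'grad'], 'graduation_date'),
--     (['employment', 'status'], 'employment_status'),
--     (['sector'], 'employment_sector'),
--     (['job', 'position', 'title'], 'job_title'),
--     (['relevance', 'relevant'], 'degree_relevance_to_work'),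
-- ]
-- FLAT = [(p, kw, field) for p, (kws, field) in enumerate(GROUPS) for kw in kws]
--
-- # keywords indexed by their first character: at a given position only the
-- # keywords that could start there are tried
-- BY_FIRST = {}
-- for p, kw, field in FLAT:
--     BY_FIRST.setdefault(kw[0], []).append((p, kw, field))
--
-- def normalize_column_name(col_name):
--     """Normalize column names to match database fields (position scan)."""
--     c = str(col_name).strip().lower()
--     best = None
--     for i in range(len(c)):
--         for p, kw, field in BY_FIRST.get(c[i], ()):
--             if (best is None or p < best[0]) and c.startswith(kw, i):
--                 best = (p, field)
--     return best[1] if best is not None else c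
-- ===== Notes on version B (the rewrite author's own statement) =====
-- stated objective: alternative
-- what changed: Instead of A's elif chain running a separate substring search over the whole string for each keyword, B scans the normalized string once by start position, tests which keywords begin at each position with startswith, and keeps the match from the earliest group (a flat (priority, keyword, field) table); the minimum-priority match anywhere reproduces A's first-true-branch result exactly.
import Mathlib
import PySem

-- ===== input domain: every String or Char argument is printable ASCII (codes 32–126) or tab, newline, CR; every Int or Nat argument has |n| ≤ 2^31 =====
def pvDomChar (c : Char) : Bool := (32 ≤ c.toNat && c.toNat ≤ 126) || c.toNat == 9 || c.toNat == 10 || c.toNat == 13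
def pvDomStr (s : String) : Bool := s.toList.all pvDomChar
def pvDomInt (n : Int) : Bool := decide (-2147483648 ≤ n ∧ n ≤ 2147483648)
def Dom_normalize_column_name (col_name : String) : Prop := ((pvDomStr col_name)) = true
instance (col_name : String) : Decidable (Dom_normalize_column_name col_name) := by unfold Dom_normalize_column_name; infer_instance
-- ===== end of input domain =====

-- ===== PORT A =====
-- B replaces A's keyword-driven elif chain of repeated substring scans by a single
-- position-driven scan of the normalized string, keeping the earliest-group keyword
-- that starts at any position (objective: alternative). Same return value.
def normalize_column_name (col_name : String) : String :=
  let c := PySem.Str.lower (PySem.Str.strip col_name)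
  if ["student number", "stud_num", "student no"].any (fun k => PySem.Str.isIn k c) then "stud_num"
  else if ["last name", "surname", "family", "last"].any (fun k => PySem.Str.isIn k c) then "last_name"
  else if ["first name", "given", "first"].any (fun k => PySem.Str.isIn k c) then "first_name"
  else if ["middle name", "middle"].any (fun k => PySem.Str.isIn k c) then "middle_name"
  else if ["email address", "email"].any (fun k => PySem.Str.isIn k c) then "email"
  else if ["address"].any (fun k => PySem.Str.isIn k c) then "address"
  else if ["contact number", "phone", "mobile", "contact"].any (fun k => PySem.Str.isIn k c) then "contact_num"
  else if ["photo"].any (fun k => PySem.Str.isIn k c) then "photo"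
  else if ["program", "course", "degree"].any (fun k => PySem.Str.isIn k c) then "program"
  else if ["major", "specialization"].any (fun k => PySem.Str.isIn k c) then "major"
  else if ["graduation", "grad"].any (fun k => PySem.Str.isIn k c) then "graduation_date"
  else if ["employment", "status"].any (fun k => PySem.Str.isIn k c) then "employment_status"
  else if ["sector"].any (fun k => PySem.Str.isIn k c) then "employment_sector"
  else if ["job", "position", "title"].any (fun k => PySem.Str.isIn k c) then "job_title"
  else if ["relevance", "relevant"].any (fun k => PySem.Str.isIn k c) then "degree_relevance_to_work"
  else c

-- ===== PORT B =====
def pvGroups : List (List String × String) :=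
  [ (["student number", "stud_num", "student no"], "stud_num"),
    (["last name", "surname", "family", "last"], "last_name"),
    (["first name", "given", "first"], "first_name"),
    (["middle name", "middle"], "middle_name"),
    (["email address", "email"], "email"),
    (["address"], "address"),
    (["contact number", "phone", "mobile", "contact"], "contact_num"),
    (["photo"], "photo"),
    (["program", "course", "degree"], "program"),
    (["major", "specialization"], "major"),
    (["graduation", "grad"], "graduation_date"),
    (["employment", "status"], "employment_status"),
    (["sector"], "employment_sector"),
    (["job", "position", "title"], "job_title"),
    (["relevance", "relevant"], "degree_relevance_to_work") ]

-- FLAT = [(p, kw, field) for p, (kws, field) in enumerate(GROUPS) for kw in kws]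
def pvFlat : List (Int × String × String) :=
  (PySem.List.enumerate pvGroups).flatMap (fun pe => pe.2.1.map (fun k => (pe.1, k, pe.2.2)))

-- the inner 'for p, kw, field in <entries>' loop at one start position of the string
def pvInnerL (entries : List (Int × String × String)) (tail : List Char)
    (best : Option (Int × String)) : Option (Int × String) :=
  entries.foldl
    (fun b e =>
      if (match b with | none => true | some q => decide (e.1 < q.1))
          && PySem.Chars.startswith tail e.2.1.toList
      then some (e.1, e.2.2) else b)
    best

-- BY_FIRST: keywords indexed by their first character; 'setdefault(kw[0], []).append(t)'
-- is transcribed as storing getD ++ [t] back (the same resulting mapping); kw[0] is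
-- headD (every keyword is nonempty, so headD is exact)
def pvByFirst : PySem.Dict Char (List (Int × String × String)) :=
  pvFlat.foldl
    (fun d e =>
      d.insert (e.2.1.toList.headD ' ')
        (PySem.Dict.getD d (e.2.1.toList.headD ' ') [] ++ [e]))
    PySem.Dict.empty

-- return best[1] if best is not None else c
def pvFinish (c : String) (best : Option (Int × String)) : String :=
  match best with
  | some q => q.2
  | none => c

-- c[i] for i in range(len(c)) is exactly cs.getD i ' ' (always in range);
-- c.startswith(kw, i) with 0 ≤ i ≤ len(c) is exactly startswith on cs.drop i
def normalize_column_name_alt (col_name : String) : String :=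
  let c := PySem.Str.lower (PySem.Str.strip col_name)
  let cs := c.toList
  let best := (List.range cs.length).foldl
    (fun b i => pvInnerL (PySem.Dict.getD pvByFirst (cs.getD i ' ') []) (cs.drop i) b) none
  pvFinish c best

-- ===== PRECONDITION & SPEC =====
def Spec_normalize_column_name (col_name : String) (out : String) : Prop := out = normalize_column_name_alt col_name
instance (col_name : String) (out : String) : Decidable (Spec_normalize_column_name col_name out) := by unfold Spec_normalize_column_name; infer_instance

-- ===== CLAIM (what is proved, stated in full; the proofs are below) =====
def Claim_equal_normalize_column_name : Prop := ∀ (col_name : String), Dom_normalize_column_name col_name → Spec_normalize_column_name col_name (normalize_column_name col_name)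

-- ===== LEMMAS AND PROOFS =====

-- the fixed flattened table, computed once
lemma pvFlat_lit : pvFlat =
  [ ((0 : Int), "student number", "stud_num"),
    ((0 : Int), "stud_num", "stud_num"),
    ((0 : Int), "student no", "stud_num"),
    ((1 : Int), "last name", "last_name"),
    ((1 : Int), "surname", "last_name"),
    ((1 : Int), "family", "last_name"),
    ((1 : Int), "last", "last_name"),
    ((2 : Int), "first name", "first_name"),
    ((2 : Int), "given", "first_name"),
    ((2 : Int), "first", "first_name"),
    ((3 : Int), "middle name", "middle_name"),
    ((3 : Int), "middle", "middle_name"),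
    ((4 : Int), "email address", "email"),
    ((4 : Int), "email", "email"),
    ((5 : Int), "address", "address"),
    ((6 : Int), "contact number", "contact_num"),
    ((6 : Int), "phone", "contact_num"),
    ((6 : Int), "mobile", "contact_num"),
    ((6 : Int), "contact", "contact_num"),
    ((7 : Int), "photo", "photo"),
    ((8 : Int), "program", "program"),
    ((8 : Int), "course", "program"),
    ((8 : Int), "degree", "program"),
    ((9 : Int), "major", "major"),
    ((9 : Int), "specialization", "major"),
    ((10 : Int), "graduation", "graduation_date"),
    ((10 : Int), "grad", "graduation_date"),
    ((11 : Int), "employment", "employment_status"),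
    ((11 : Int), "status", "employment_status"),
    ((12 : Int), "sector", "employment_sector"),
    ((13 : Int), "job", "job_title"),
    ((13 : Int), "position", "job_title"),
    ((13 : Int), "title", "job_title"),
    ((14 : Int), "relevance", "degree_relevance_to_work"),
    ((14 : Int), "relevant", "degree_relevance_to_work") ] := by decide

-- proof-side reference forms of B's loop: the inner loop over the whole flattened
-- table, and the scan including the (vacuous) start position len(cs)
def pvInner (tail : List Char) (best : Option (Int × String)) : Option (Int × String) :=
  pvInnerL pvFlat tail best

def pvScan (cs : List Char) : Option (Int × String) :=
  (List.range (cs.length + 1)).foldl (fun b i => pvInner (cs.drop i) b) none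

-- the double loop as a single fold over (position, entry) pairs
def pvPairs (cs : List Char) : List (Nat × (Int × String × String)) :=
  (List.range (cs.length + 1)).flatMap (fun i => pvFlat.map (fun e => (i, e)))

def pvStepP (cs : List Char) (b : Option (Int × String)) (pe : Nat × (Int × String × String)) :
    Option (Int × String) :=
  if (match b with | none => true | some q => decide (pe.2.1 < q.1))
      && PySem.Chars.startswith (cs.drop pe.1) pe.2.2.1.toList
  then some (pe.2.1, pe.2.2.2) else b

lemma fold_eq_pairs (cs : List Char) :
    pvScan cs = (pvPairs cs).foldl (pvStepP cs) none := by
  unfold pvScan pvPairs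
  rw [List.foldl_flatMap]
  have hh : ∀ (b : Option (Int × String)) (i : Nat),
      pvInner (cs.drop i) b = List.foldl (pvStepP cs) b (pvFlat.map (fun e => (i, e))) := by
    intro b i
    unfold pvInner pvInnerL
    rw [List.foldl_map]
    rfl
  simp only [hh]

def pvHit (cs : List Char) (pe : Nat × (Int × String × String)) : Prop :=
  PySem.Chars.startswith (cs.drop pe.1) pe.2.2.1.toList = true

def pvInv (cs : List Char) (proc : List (Nat × (Int × String × String)))
    (s : Option (Int × String)) : Prop :=
  match s with
  | none => ∀ pe ∈ proc, ¬ pvHit cs pe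
  | some q => (∃ pe ∈ proc, pe.2.1 = q.1 ∧ pe.2.2.2 = q.2 ∧ pvHit cs pe)
      ∧ ∀ pe ∈ proc, pvHit cs pe → q.1 ≤ pe.2.1

lemma step_inv (cs : List Char) (proc : List (Nat × (Int × String × String)))
    (s : Option (Int × String)) (pe : Nat × (Int × String × String)) (h : pvInv cs proc s) :
    pvInv cs (proc ++ [pe]) (pvStepP cs s pe) := by
  unfold pvStepP
  match s with
  | none =>
      by_cases hsw : PySem.Chars.startswith (cs.drop pe.1) pe.2.2.1.toList = true
      · simp only [hsw, Bool.and_true, if_pos]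
        refine ⟨⟨pe, by simp, rfl, rfl, hsw⟩, ?_⟩
        intro pe' hpe' hhit
        rcases List.mem_append.1 hpe' with h' | h'
        · exact absurd hhit (h pe' h')
        · simp only [List.mem_singleton] at h'; subst h'; exact le_refl _
      · simp only [Bool.true_and]
        rw [if_neg (by simpa using hsw)]
        intro pe' hpe'
        rcases List.mem_append.1 hpe' with h' | h'
        · exact h pe' h'
        · simp only [List.mem_singleton] at h'; subst h'
          simpa [pvHit] using hsw
  | some q =>
      obtain ⟨⟨pw, hpw, hw1, hw2, hw3⟩, hmin⟩ := h
      by_cases hcond : (decide (pe.2.1 < q.1) && PySem.Chars.startswith (cs.drop pe.1) pe.2.2.1.toList) = true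
      · rw [if_pos hcond]
        simp only [Bool.and_eq_true, decide_eq_true_eq] at hcond
        refine ⟨⟨pe, by simp, rfl, rfl, hcond.2⟩, ?_⟩
        intro pe' hpe' hhit
        rcases List.mem_append.1 hpe' with h' | h'
        · exact le_trans (le_of_lt hcond.1) (hmin pe' h' hhit)
        · simp only [List.mem_singleton] at h'; subst h'; exact le_refl _
      · rw [if_neg hcond]
        simp only [Bool.and_eq_true, decide_eq_true_eq, not_and] at hcond
        refine ⟨⟨pw, List.mem_append.2 (Or.inl hpw), hw1, hw2, hw3⟩, ?_⟩
        intro pe' hpe' hhit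
        rcases List.mem_append.1 hpe' with h' | h'
        · exact hmin pe' h' hhit
        · simp only [List.mem_singleton] at h'; subst h'
          by_contra hlt
          exact hcond (by omega) hhit

lemma fold_inv (cs : List Char) :
    ∀ (l proc : List (Nat × (Int × String × String))) (s : Option (Int × String)),
      pvInv cs proc s → pvInv cs (proc ++ l) (l.foldl (pvStepP cs) s) := by
  intro l
  induction l with
  | nil => intro proc s h; simpa using h
  | cons a l ih =>
      intro proc s h
      have h2 := ih (proc ++ [a]) (pvStepP cs s a) (step_inv cs proc s a h)
      simpa [List.append_assoc] using h2

lemma mem_pvPairs (cs : List Char) (pe : Nat × (Int × String × String)) :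
    pe ∈ pvPairs cs ↔ pe.1 < cs.length + 1 ∧ pe.2 ∈ pvFlat := by
  constructor
  · intro h
    simp only [pvPairs, List.mem_flatMap, List.mem_map, List.mem_range] at h
    obtain ⟨i, hi, e, he, hpe⟩ := h
    subst hpe; exact ⟨hi, he⟩
  · intro ⟨h1, h2⟩
    simp only [pvPairs, List.mem_flatMap, List.mem_map, List.mem_range]
    exact ⟨pe.1, h1, pe.2, h2, rfl⟩

lemma hit_iff_isIn (cs kw : List Char) :
    (∃ i, i < cs.length + 1 ∧ PySem.Chars.startswith (cs.drop i) kw = true)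
      ↔ PySem.Chars.isIn kw cs = true := by
  rw [← PySem.Chars.exists_prefix_drop_iff_isIn]
  constructor
  · rintro ⟨i, _, h⟩; exact ⟨i, (PySem.Chars.startswith_iff _ _).1 h⟩
  · rintro ⟨j, h⟩
    by_cases hj : j < cs.length + 1
    · exact ⟨j, hj, (PySem.Chars.startswith_iff _ _).2 h⟩
    · refine ⟨cs.length, by omega, (PySem.Chars.startswith_iff _ _).2 ?_⟩
      have hje : cs.drop j = [] := List.drop_eq_nil_of_le (by omega)
      have hle : cs.drop cs.length = [] := by simp
      rw [hle, ← hje]; exact h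

lemma A_none (col : String)
 (h : ∀ e ∈ pvFlat, PySem.Chars.isIn e.2.1.toList (PySem.Str.lower (PySem.Str.strip col)).toList = false) :
 normalize_column_name col = PySem.Str.lower (PySem.Str.strip col) := by
  rw [pvFlat_lit] at h
  simp at h
  unfold normalize_column_name
  simp [h]
lemma A_some (col : String) (p : Int) (f : String)
 (hw : ∃ e ∈ pvFlat, e.1 = p ∧ e.2.2 = f ∧ PySem.Chars.isIn e.2.1.toList (PySem.Str.lower (PySem.Str.strip col)).toList = true)
 (hm : ∀ e ∈ pvFlat, PySem.Chars.isIn e.2.1.toList (PySem.Str.lower (PySem.Str.strip col)).toList = true → p ≤ e.1) :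
 normalize_column_name col = f := by
  rw [pvFlat_lit] at hw hm
  simp at hw hm
  unfold normalize_column_name
  rcases hw with ⟨hp,hf,hk⟩|⟨hp,hf,hk⟩|⟨hp,hf,hk⟩|⟨hp,hf,hk⟩|⟨hp,hf,hk⟩|⟨hp,hf,hk⟩|⟨hp,hf,hk⟩|⟨hp,hf,hk⟩|⟨hp,hf,hk⟩|⟨hp,hf,hk⟩|⟨hp,hf,hk⟩|⟨hp,hf,hk⟩|⟨hp,hf,hk⟩|⟨hp,hf,hk⟩|⟨hp,hf,hk⟩|⟨hp,hf,hk⟩|⟨hp,hf,hk⟩|⟨hp,hf,hk⟩|⟨hp,hf,hk⟩|⟨hp,hf,hk⟩|⟨hp,hf,hk⟩|⟨hp,hf,hk⟩|⟨hp,hf,hk⟩|⟨hp,hf,hk⟩|⟨hp,hf,hk⟩|⟨hp,hf,hk⟩|⟨hp,hf,hk⟩|⟨hp,hf,hk⟩|⟨hp,hf,hk⟩|⟨hp,hf,hk⟩|⟨hp,hf,hk⟩|⟨hp,hf,hk⟩|⟨hp,hf,hk⟩|⟨hp,hf,hk⟩|⟨hp,hf,hk⟩ <;>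
    (subst hp; subst hf; simp at hm ⊢ <;> simp [hm, hk])

lemma fold_inv_all (cs : List Char) :
    pvInv cs (pvPairs cs) ((pvPairs cs).foldl (pvStepP cs) none) := by
  have h0 : pvInv cs [] none := by unfold pvInv; intro pe hpe; cases hpe
  simpa using fold_inv cs (pvPairs cs) [] none h0

lemma scan_none (cs : List Char) (hq : pvScan cs = none) :
    ∀ e ∈ pvFlat, PySem.Chars.isIn e.2.1.toList cs = false := by
  have hinv := fold_inv_all cs
  rw [fold_eq_pairs] at hq
  rw [hq] at hinv
  unfold pvInv at hinv
  intro e he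
  by_contra hne
  have ht : PySem.Chars.isIn e.2.1.toList cs = true := by simpa using hne
  obtain ⟨i, hi, hsw⟩ := (hit_iff_isIn cs e.2.1.toList).mpr ht
  exact hinv (i, e) ((mem_pvPairs cs (i, e)).2 ⟨hi, he⟩) hsw

lemma scan_some (cs : List Char) (q : Int × String) (hq : pvScan cs = some q) :
    (∃ e ∈ pvFlat, e.1 = q.1 ∧ e.2.2 = q.2 ∧ PySem.Chars.isIn e.2.1.toList cs = true)
      ∧ ∀ e ∈ pvFlat, PySem.Chars.isIn e.2.1.toList cs = true → q.1 ≤ e.1 := by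
  have hinv := fold_inv_all cs
  rw [fold_eq_pairs] at hq
  rw [hq] at hinv
  unfold pvInv at hinv
  obtain ⟨⟨pw, hpw, h1, h2, h3⟩, hmin⟩ := hinv
  constructor
  · unfold pvHit at h3
    refine ⟨pw.2, ((mem_pvPairs cs pw).1 hpw).2, h1, h2, ?_⟩
    exact (hit_iff_isIn cs pw.2.2.1.toList).mp ⟨pw.1, ((mem_pvPairs cs pw).1 hpw).1, h3⟩
  · intro e he hin
    obtain ⟨i, hi, hsw⟩ := (hit_iff_isIn cs e.2.1.toList).mpr hin
    exact hmin (i, e) ((mem_pvPairs cs (i, e)).2 ⟨hi, he⟩) hsw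

-- the BY_FIRST build: getD is the in-order filter of the flattened table
lemma getD_build (k : (Int × String × String) → Char) :
    ∀ (l : List (Int × String × String)) (d : PySem.Dict Char (List (Int × String × String)))
      (ch : Char),
      PySem.Dict.getD
          (l.foldl (fun d e => d.insert (k e) (PySem.Dict.getD d (k e) [] ++ [e])) d) ch []
        = PySem.Dict.getD d ch [] ++ l.filter (fun e => k e == ch) := by
  intro l
  induction l with
  | nil => intro d ch; simp
  | cons e l ih =>
      intro d ch
      simp only [List.foldl_cons, List.filter_cons]
      rw [ih]
      rw [PySem.Dict.getD_insert]
      by_cases hch : ch = k e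
      · subst hch
        simp
      · rw [if_neg hch]
        have : (k e == ch) = false := by simpa using fun h => hch h.symm
        simp [this]

lemma byFirst_getD (ch : Char) :
    PySem.Dict.getD pvByFirst ch []
      = pvFlat.filter (fun e => e.2.1.toList.headD ' ' == ch) := by
  unfold pvByFirst
  rw [getD_build]
  simp [PySem.Dict.getD_empty]

lemma kw_ne_nil : ∀ e ∈ pvFlat, e.2.1.toList ≠ [] := by
  rw [pvFlat_lit]; decide

lemma startswith_head (tail kw : List Char) (hk : kw ≠ [])
    (h : PySem.Chars.startswith tail kw = true) : tail.head? = kw.head? := by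
  obtain ⟨t, rfl⟩ := (PySem.Chars.startswith_iff tail kw).1 h
  cases kw with
  | nil => exact absurd rfl hk
  | cons a l => simp

-- a fold whose every step is the identity does nothing
lemma foldl_id {α β : Type} (l : List α) (f : β → α → β)
    (h : ∀ e ∈ l, ∀ s, f s e = s) (b : β) : l.foldl f b = b := by
  induction l generalizing b with
  | nil => rfl
  | cons e l ih =>
      rw [List.foldl_cons, h e (by simp)]
      exact ih (fun e' he' => h e' (by simp [he'])) b

-- a keyword whose first character is not cs[i] cannot start at position i
lemma startswith_false_of_head_ne (cs : List Char) (i : Nat) (hi : i < cs.length)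
    (kw : List Char) (hk : kw ≠ []) (hne : (kw.headD ' ' == cs.getD i ' ') = false) :
    PySem.Chars.startswith (cs.drop i) kw = false := by
  by_contra hx
  have hsw : PySem.Chars.startswith (cs.drop i) kw = true := by simpa using hx
  have hh := startswith_head (cs.drop i) kw hk hsw
  have h1 : (cs.drop i).head? = some (cs.getD i ' ') := by
    rw [List.head?_drop]
    rw [List.getElem?_eq_getElem hi]
    rw [List.getD_eq_getElem?_getD, List.getElem?_eq_getElem hi]
    rfl
  have h2 : kw.head? = some (kw.headD ' ') := by
    cases kw with
    | nil => exact absurd rfl hk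
    | cons a l => rfl
  rw [h1, h2] at hh
  have heq : kw.headD ' ' = cs.getD i ' ' := (Option.some.inj hh).symm
  rw [heq] at hne
  simp at hne

-- at a real position, dispatching on the first character loses no matches
lemma inner_dispatch (cs : List Char) (i : Nat) (hi : i < cs.length)
    (b : Option (Int × String)) :
    pvInnerL (PySem.Dict.getD pvByFirst (cs.getD i ' ') []) (cs.drop i) b
      = pvInner (cs.drop i) b := by
  rw [byFirst_getD]
  unfold pvInner pvInnerL
  rw [← PySem.List.foldl_if_eq_foldl_filter]
  apply PySem.List.foldl_congr_mem
  intro acc e he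
  by_cases hp : (e.2.1.toList.headD ' ' == cs.getD i ' ') = true
  · rw [if_pos hp]
  · have hpf : (e.2.1.toList.headD ' ' == cs.getD i ' ') = false := by
      simpa using hp
    rw [if_neg (by simp only [hpf]; exact Bool.false_ne_true)]
    rw [startswith_false_of_head_ne cs i hi e.2.1.toList (kw_ne_nil e he) hpf]
    simp

-- at the (excluded) start position len(cs) nothing can match
lemma inner_last (cs : List Char) (b : Option (Int × String)) :
    pvInner (cs.drop cs.length) b = b := by
  unfold pvInner pvInnerL
  apply foldl_id
  intro e he s
  have hsw : PySem.Chars.startswith (cs.drop cs.length) e.2.1.toList = false := by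
    by_contra hx
    have : PySem.Chars.startswith [] e.2.1.toList = true := by
      simpa [List.drop_length] using hx
    have := (PySem.Chars.startswith_iff [] e.2.1.toList).1 this
    exact kw_ne_nil e he (List.prefix_nil.1 this)
  rw [hsw]
  simp

-- B's dispatched position loop computes exactly the plain scan
lemma alt_scan (cs : List Char) :
    (List.range cs.length).foldl
        (fun b i => pvInnerL (PySem.Dict.getD pvByFirst (cs.getD i ' ') []) (cs.drop i) b) none
      = pvScan cs := by
  unfold pvScan
  rw [List.range_succ, List.foldl_append]
  simp only [List.foldl_cons, List.foldl_nil]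
  rw [inner_last]
  apply PySem.List.foldl_congr_mem
  intro acc i hi
  exact inner_dispatch cs i (List.mem_range.1 hi) acc

-- ===== VERDICT (by name: the statement is the Claim_ definition above) =====
theorem normalize_column_name_spec : Claim_equal_normalize_column_name := by
  intro col _
  unfold Spec_normalize_column_name
  have hport : normalize_column_name_alt col
      = pvFinish (PySem.Str.lower (PySem.Str.strip col))
          (pvScan ((PySem.Str.lower (PySem.Str.strip col)).toList)) := by
    rw [show normalize_column_name_alt col
        = pvFinish (PySem.Str.lower (PySem.Str.strip col))
            ((List.range ((PySem.Str.lower (PySem.Str.strip col)).toList).length).foldl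
              (fun b i =>
                pvInnerL
                  (PySem.Dict.getD pvByFirst
                    (((PySem.Str.lower (PySem.Str.strip col)).toList).getD i ' ') [])
                  (((PySem.Str.lower (PySem.Str.strip col)).toList).drop i) b) none)
      from rfl]
    rw [alt_scan]
  rcases hq : pvScan ((PySem.Str.lower (PySem.Str.strip col)).toList) with _ | q
  · rw [hport, hq]
    exact A_none col (scan_none _ hq)
  · rw [hport, hq]
    obtain ⟨hw, hm⟩ := scan_some _ q hq
    exact A_some col q.1 q.2 hw hm
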